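-- pv_equiv track=rewrite | github.com/Mitix-EPI/Epitech-All-Projects | Tek2/Math/201yams/bonus/src/Yams/Combination.py | checkStraight
-- ===== SOURCE A (Python) =====
-- def checkStraight(dies):
--     diesCopy = dies.copy()
--     numberStraight = 0
--     beforeSmallest = 0
--
--     while len(diesCopy) > 0:
--         smallest = diesCopy[0]
--         index = 0
--         ind = 0
--         for i in diesCopy:
--             if ind == index:
--                 ind += 1
--                 continue
--             if i < smallest:
--                 index = ind
--                 smallest = i
--             ind += 1
--         if beforeSmallest == 0:
--             numberStraight = 1
--         elif beforeSmallest + 1 == smallest: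
--             numberStraight += 1
--         else:
--             numberStraight = 1
--         if numberStraight >= 5:
--             break
--         del diesCopy[index]
--         beforeSmallest = smallest
--     if numberStraight >= 5:
--         return 40
--     return 0
-- ===== SOURCE B (Python) =====
-- def checkStraight(dies):
--     run = 0
--     prev = 0
--     for v in sorted(dies):
--         if prev == 0 or prev + 1 != v:
--             run = 1
--         else:
--             run += 1
--         if run >= 5:
--             return 40
--         prev = v
--     return 0
-- ===== Notes on version B (the rewrite author's own statement) =====
-- stated objective: faster
-- what changed: A repeatedly scans the remaining list for its minimum and deletes it (selection-sort style); B sorts once and does a single linear scan counting the run of consecutive values.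
import Mathlib
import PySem

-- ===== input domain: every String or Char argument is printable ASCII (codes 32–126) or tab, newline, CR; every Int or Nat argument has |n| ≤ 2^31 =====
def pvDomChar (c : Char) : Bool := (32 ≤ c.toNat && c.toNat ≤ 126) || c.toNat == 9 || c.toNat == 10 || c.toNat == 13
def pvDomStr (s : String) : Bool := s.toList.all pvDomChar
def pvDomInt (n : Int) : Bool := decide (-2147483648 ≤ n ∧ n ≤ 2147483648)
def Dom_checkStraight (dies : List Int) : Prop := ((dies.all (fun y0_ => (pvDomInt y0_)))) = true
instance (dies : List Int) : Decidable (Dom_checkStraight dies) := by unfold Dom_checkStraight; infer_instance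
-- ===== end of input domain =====

-- B sorts the dice once and scans for a run of 5 consecutive values, instead of A's
-- repeated minimum-extraction scan; same return value on every input (objective: faster).

-- ===== PORT A =====
-- A's inner `for` loop: finds the smallest value and the index of its first occurrence
-- (`index`/`ind` are A's position counters, always nonnegative, kept as Nat).
def csFor : List Int → Int → Nat → Nat → Int × Nat
  | [], smallest, index, _ => (smallest, index)
  | i :: rest, smallest, index, ind =>
    if ind = index then csFor rest smallest index (ind + 1)
    else if i < smallest then csFor rest i ind (ind + 1)
    else csFor rest smallest index (ind + 1)

-- bound on the returned index, cited by csWhile's termination proof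
lemma csFor_idx_bound : ∀ (l : List Int) (s : Int) (idx ind : Nat),
    (csFor l s idx ind).2 = idx ∨
      (ind ≤ (csFor l s idx ind).2 ∧ (csFor l s idx ind).2 < ind + l.length) := by
  intro l
  induction l with
  | nil => intro s idx ind; left; rfl
  | cons i rest ih =>
    intro s idx ind
    simp only [csFor]
    split_ifs with h1 h2
    · rcases ih s idx (ind + 1) with h | h
      · left; exact h
      · right; simp only [List.length_cons]; omega
    · rcases ih i ind (ind + 1) with h | h
      · right; simp only [List.length_cons]; omega
      · right; simp only [List.length_cons]; omega
    · rcases ih s idx (ind + 1) with h | h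
      · left; exact h
      · right; simp only [List.length_cons]; omega

lemma csFor_lt_length (dc : List Int) (s : Int) (h : dc ≠ []) :
    (csFor dc s 0 0).2 < dc.length := by
  have hl : 0 < dc.length := List.length_pos_of_ne_nil h
  rcases csFor_idx_bound dc s 0 0 with h' | h'
  · omega
  · omega

-- A's `while` loop over (diesCopy, numberStraight, beforeSmallest)
def csWhile (dc : List Int) (ns bs : Int) : Int :=
  if hne : dc = [] then (if ns ≥ 5 then 40 else 0)
  else
    let r := csFor dc (dc.head hne) 0 0
    let ns' : Int := if bs = 0 then 1 else if bs + 1 = r.1 then ns + 1 else 1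
    if ns' ≥ 5 then 40
    else csWhile (dc.eraseIdx r.2) ns' r.1
termination_by dc.length
decreasing_by
  have h := csFor_lt_length dc (dc.head hne) hne
  rw [List.length_eraseIdx]
  simp only [h, if_true]
  have : 0 < dc.length := List.length_pos_of_ne_nil hne
  omega

def checkStraight (dies : List Int) : Int := csWhile dies 0 0

-- ===== PORT B =====
-- B's scan over sorted(dies) with state (run, prev)
def csScan : List Int → Int → Int → Int
  | [], _, _ => 0
  | v :: rest, run, prev =>
    let run' : Int := if prev = 0 ∨ prev + 1 ≠ v then 1 else run + 1
    if run' ≥ 5 then 40 else csScan rest run' v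

def checkStraight_alt (dies : List Int) : Int :=
  csScan (PySem.List.sorted dies (fun x => x) false) 0 0

-- ===== PRECONDITION & SPEC =====
def Spec_checkStraight (dies : List Int) (out : Int) : Prop := out = checkStraight_alt dies
instance (dies : List Int) (out : Int) : Decidable (Spec_checkStraight dies out) := by unfold Spec_checkStraight; infer_instance

-- ===== CLAIM (what is proved, stated in full; the proofs are below) =====
def Claim_equal_checkStraight : Prop := ∀ (dies : List Int), Dom_checkStraight dies → Spec_checkStraight dies (checkStraight dies)

-- ===== LEMMAS AND PROOFS =====

-- csFor, started after having consumed `pre` with current best s at position idx,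
-- returns the minimum of pre ++ l together with the index of its first occurrence.
lemma csFor_spec : ∀ (l pre : List Int) (s : Int) (idx : Nat),
    idx < pre.length → pre[idx]? = some s →
    (∀ k, k < idx → ∀ y, pre[k]? = some y → s < y) →
    (∀ x ∈ pre, s ≤ x) →
    (csFor l s idx pre.length).2 < (pre ++ l).length ∧
    (pre ++ l)[(csFor l s idx pre.length).2]? = some (csFor l s idx pre.length).1 ∧
    (∀ k, k < (csFor l s idx pre.length).2 → ∀ y, (pre ++ l)[k]? = some y →
      (csFor l s idx pre.length).1 < y) ∧
    (∀ x ∈ pre ++ l, (csFor l s idx pre.length).1 ≤ x) := by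
  intro l
  induction l with
  | nil =>
    intro pre s idx h1 h2 h3 h4
    simp only [csFor, List.append_nil]
    exact ⟨h1, h2, h3, h4⟩
  | cons i rest ih =>
    intro pre s idx h1 h2 h3 h4
    have hne : pre.length ≠ idx := by omega
    simp only [csFor, hne, if_false]
    by_cases hlt : i < s
    · simp only [hlt, if_true]
      have key := ih (pre ++ [i]) i pre.length
        (by simp) (by simp)
        (by
          intro k hk y hy
          rw [List.getElem?_append_left hk] at hy
          have : s ≤ y := h4 y (List.mem_of_getElem? hy)
          omega)
        (by
          intro x hx
          rcases List.mem_append.1 hx with hx | hx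
          · have := h4 x hx; omega
          · simp at hx; omega)
      simpa [List.length_append, List.append_assoc] using key
    · simp only [hlt, if_false]
      have key := ih (pre ++ [i]) s idx
        (by simp; omega)
        (by rw [List.getElem?_append_left h1]; exact h2)
        (by
          intro k hk y hy
          rw [List.getElem?_append_left (by omega)] at hy
          exact h3 k hk y hy)
        (by
          intro x hx
          rcases List.mem_append.1 hx with hx | hx
          · exact h4 x hx
          · simp at hx; omega)
      simpa [List.length_append, List.append_assoc] using key
  
-- removing the first occurrence of the minimum by index = List.erase of the minimum
lemma eraseIdx_eq_erase : ∀ (l : List Int) (j : Nat) (m : Int),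
    l[j]? = some m → (∀ k, k < j → ∀ y, l[k]? = some y → m < y) →
    l.eraseIdx j = l.erase m := by
  intro l
  induction l with
  | nil => intro j m hj _; simp at hj
  | cons a t ih =>
    intro j m hj hlt
    cases j with
    | zero =>
      simp at hj
      simp [List.eraseIdx, hj]
    | succ j =>
      have ha : m < a := hlt 0 (Nat.succ_pos j) a (by simp)
      have htail : t.eraseIdx j = t.erase m :=
        ih j m (by simpa using hj)
          (fun k hk y hy => hlt (k + 1) (by omega) y (by simpa using hy))
      have hne : (a == m) = false := by simp; omega
      simp [List.eraseIdx, hne, htail]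

-- sorted(l) = min :: sorted(l with first min removed)
lemma sorted_cons_min (l : List Int) (m : Int) (hm : m ∈ l) (hle : ∀ x ∈ l, m ≤ x) :
    PySem.List.sorted l (fun x => x) false
      = m :: PySem.List.sorted (l.erase m) (fun x => x) false := by
  apply PySem.List.sorted_id_eq_of_perm_of_pairwise
  · exact ((PySem.List.sorted_perm (l.erase m) (fun x => x) false).cons m).trans
      (List.perm_cons_erase hm).symm
  · rw [List.pairwise_cons]
    constructor
    · intro y hy
      have : y ∈ l.erase m := (PySem.List.mem_sorted _ _ _ _).1 hy
      exact hle y (List.mem_of_mem_erase this)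
    · exact PySem.List.sorted_pairwise (l.erase m) (fun x => x)

-- the combined facts about A's inner loop on a nonempty list
lemma csFor_top (d0 : Int) (t : List Int) :
    (csFor (d0 :: t) d0 0 0).2 < (d0 :: t).length ∧
    (d0 :: t)[(csFor (d0 :: t) d0 0 0).2]? = some (csFor (d0 :: t) d0 0 0).1 ∧
    (∀ k, k < (csFor (d0 :: t) d0 0 0).2 → ∀ y, (d0 :: t)[k]? = some y →
      (csFor (d0 :: t) d0 0 0).1 < y) ∧
    (∀ x ∈ d0 :: t, (csFor (d0 :: t) d0 0 0).1 ≤ x) := by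
  have hstep : csFor (d0 :: t) d0 0 0 = csFor t d0 0 [d0].length := by
    simp [csFor]
  rw [hstep]
  have key := csFor_spec t [d0] d0 0 (by simp) (by simp)
    (by intro k hk; omega) (by intro x hx; simp at hx; omega)
  simpa using key

-- main bridge: A's while loop equals B's scan of the sorted list
lemma bridge : ∀ (n : Nat) (l : List Int) (ns bs : Int), l.length ≤ n → ns < 5 →
    csWhile l ns bs = csScan (PySem.List.sorted l (fun x => x) false) ns bs := by
  intro n
  induction n with
  | zero =>
    intro l ns bs hlen hns
    have : l = [] := List.eq_nil_of_length_eq_zero (by omega)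
    subst this
    rw [csWhile]
    simp [csScan, PySem.List.sorted, not_le.2 hns]
  | succ n ih =>
    intro l ns bs hlen hns
    rcases l with _ | ⟨d0, t⟩
    · rw [csWhile]
      simp [csScan, PySem.List.sorted, not_le.2 hns]
    · obtain ⟨hlt, hget, hfirst, hmin⟩ := csFor_top d0 t
      have hm : (csFor (d0 :: t) d0 0 0).1 ∈ d0 :: t := List.mem_of_getElem? hget
      have hsort := sorted_cons_min (d0 :: t) _ hm hmin
      have herase := eraseIdx_eq_erase (d0 :: t) _ _ hget hfirst
      rw [csWhile, dif_neg (List.cons_ne_nil d0 t)]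
      have hns' : (if bs = 0 then (1:Int) else if bs + 1 = (csFor (d0 :: t) d0 0 0).1
            then ns + 1 else 1)
          = (if bs = 0 ∨ bs + 1 ≠ (csFor (d0 :: t) d0 0 0).1 then 1 else ns + 1) := by
        by_cases hb : bs = 0 <;> by_cases hc : bs + 1 = (csFor (d0 :: t) d0 0 0).1 <;>
          simp [hb, hc]
      simp only [List.head_cons, hsort, csScan, herase]
      rw [← hns']
      have hlen2 : ((d0 :: t).erase (csFor (d0 :: t) d0 0 0).1).length ≤ n := by
        rw [List.length_erase_of_mem hm]
        simp only [List.length_cons] at hlen ⊢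
        omega
      split_ifs <;> first
        | rfl
        | exact ih _ _ _ hlen2 (by omega)

-- ===== VERDICT (by name: the statement is the Claim_ definition above) =====
theorem checkStraight_spec : Claim_equal_checkStraight := by
  intro dies _
  unfold Spec_checkStraight checkStraight checkStraight_alt
  exact bridge dies.length dies 0 0 le_rfl (by norm_num)
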